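-- pv_equiv track=rewrite | github.com/maengjh0208/algorithm_coding_test | 할인 행사.py | solution
-- ===== SOURCE A (Python) =====
-- def compare_dict(want_dict: dict, discount_dict: dict) -> bool:
--     for key in want_dict:
--         if key not in discount_dict:
--             return False
--
--         if want_dict[key] != discount_dict[key]:
--             return False
--
--     return True
--
-- def solution(want: list, number: list, discount: list) -> int:
--     want_dict = {w: n for w, n in zip(want, number)}
--
--     discount_dict = {}
--     for product in discount[:9]:
--         if product in discount_dict:
--             discount_dict[product] += 1
--         else:
--             discount_dict[product] = 1
--
--     count = 0
--     for idx in range(9, len(discount)):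
--         if discount[idx] in discount_dict:
--             discount_dict[discount[idx]] += 1
--         else:
--             discount_dict[discount[idx]] = 1
--
--         if compare_dict(want_dict, discount_dict):
--             count += 1
--
--         discount_dict[discount[idx - 9]] -= 1
--
--     return count
-- ===== SOURCE B (Python) =====
-- def solution(want: list, number: list, discount: list) -> int:
--     # Sliding window: instead of re-comparing the whole wanted dict for
--     # every window, maintain `satisfied` = number of wanted keys whose current
--     # window count matches, updated as each element enters/leaves.
--     target = {w: n for w, n in zip(want, number)}
--     need = len(target)
--
--     cnt = {}        # window counts; keys are never removed (a key once seen stays)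
--     satisfied = 0   # |{k in target : k in cnt and cnt[k] == target[k]}|
--
--     def add(p, delta):
--         nonlocal satisfied
--         if p in target:
--             if cnt.get(p) == target[p]:
--                 satisfied -= 1
--         cnt[p] = cnt.get(p, 0) + delta
--         if p in target:
--             if cnt.get(p) == target[p]:
--                 satisfied += 1
--
--     for p in discount[:9]:
--         add(p, 1)
--
--     count = 0
--     for idx in range(9, len(discount)):
--         add(discount[idx], 1)
--         if satisfied == need:
--             count += 1
--         add(discount[idx - 9], -1)
--     return count
-- ===== Notes on version B (the rewrite author's own statement) =====
-- stated objective: alternative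
-- what changed: Replaces the full wanted-dict comparison done for every window with an incrementally maintained count of satisfied wanted keys, updated in O(1) as each product enters/leaves the 10-element window (O(n+k) worst case vs A's O(n*k); not measurably faster since A's comparison early-exits).
import Mathlib
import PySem

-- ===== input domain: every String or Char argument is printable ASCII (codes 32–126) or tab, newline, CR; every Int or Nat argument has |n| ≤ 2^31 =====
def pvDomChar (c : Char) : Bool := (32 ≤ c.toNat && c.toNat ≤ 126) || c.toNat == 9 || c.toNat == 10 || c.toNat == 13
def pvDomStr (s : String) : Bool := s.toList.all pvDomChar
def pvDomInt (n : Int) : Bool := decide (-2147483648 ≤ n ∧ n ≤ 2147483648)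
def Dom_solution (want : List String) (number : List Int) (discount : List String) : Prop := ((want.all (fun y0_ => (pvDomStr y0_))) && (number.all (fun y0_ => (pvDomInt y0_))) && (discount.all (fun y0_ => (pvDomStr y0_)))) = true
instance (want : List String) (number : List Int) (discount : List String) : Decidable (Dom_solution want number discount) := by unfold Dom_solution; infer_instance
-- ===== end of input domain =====

-- B replaces the per-window wanted-dict comparison by an incrementally maintained
-- counter of satisfied wanted keys, updated as each product enters/leaves the window.

-- ===== PORT A =====
-- compare_dict's for-loop with early returns, as structural recursion over the key list
def compareDictLoop (wantD dd : PySem.Dict String Int) : List String → Bool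
  | [] => true
  | k :: rest =>
    if dd.contains k = false then false
    -- want_dict[key] / discount_dict[key]: both keys are present here, so getD _ 0 is exact
    else if wantD.getD k 0 ≠ dd.getD k 0 then false
    else compareDictLoop wantD dd rest

def compareDict (wantD dd : PySem.Dict String Int) : Bool :=
  compareDictLoop wantD dd wantD.keys

def solution (want : List String) (number : List Int) (discount : List String) : Int :=
  let wantD := (want.zip number).foldl (fun d (p : String × Int) => d.insert p.1 p.2) PySem.Dict.empty
  let dd0 := (PySem.List.slice discount none (some 9)).foldl
      (fun d p => if d.contains p then d.modify p 0 (· + 1) else d.insert p 1) PySem.Dict.empty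
  let st := (PySem.List.pyRange 9 (discount.length : Int) 1).foldl
      (fun (st : PySem.Dict String Int × Int) idx =>
        -- discount[idx]: 9 ≤ idx < len(discount), in range, so the default is never used
        let p := PySem.List.pyGetD discount idx ""
        let d1 := if st.1.contains p then st.1.modify p 0 (· + 1) else st.1.insert p 1
        let c1 := if compareDict wantD d1 then st.2 + 1 else st.2
        -- discount_dict[discount[idx-9]] -= 1: the key was inserted earlier, always present,
        -- so modify _ 0 (· - 1) is exact
        let q := PySem.List.pyGetD discount (idx - 9) ""
        (d1.modify q 0 (· - 1), c1))
      (dd0, 0)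
  st.2

-- ===== PORT B =====
-- add(p, delta): update window count and the satisfied-keys counter
def altAdd (target : PySem.Dict String Int) (st : PySem.Dict String Int × Int)
    (p : String) (delta : Int) : PySem.Dict String Int × Int :=
  -- cnt.get(p) == target[p]: None ≠ int, so this is get? p = target.get? p (target contains p)
  let s1 := if target.contains p then (if st.1.get? p = target.get? p then st.2 - 1 else st.2) else st.2
  let c1 := st.1.insert p (st.1.getD p 0 + delta)
  let s2 := if target.contains p then (if c1.get? p = target.get? p then s1 + 1 else s1) else s1
  (c1, s2)

def solution_alt (want : List String) (number : List Int) (discount : List String) : Int :=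
  let target := (want.zip number).foldl (fun d (p : String × Int) => d.insert p.1 p.2) PySem.Dict.empty
  let need : Int := target.size
  let st0 := (PySem.List.slice discount none (some 9)).foldl (fun st p => altAdd target st p 1)
      (PySem.Dict.empty, 0)
  let res := (PySem.List.pyRange 9 (discount.length : Int) 1).foldl
      (fun (st : (PySem.Dict String Int × Int) × Int) idx =>
        let st1 := altAdd target st.1 (PySem.List.pyGetD discount idx "") 1
        let c1 := if st1.2 = need then st.2 + 1 else st.2
        (altAdd target st1 (PySem.List.pyGetD discount (idx - 9) "") (-1), c1))
      ((st0, 0) : (PySem.Dict String Int × Int) × Int)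
  res.2

-- ===== PRECONDITION & SPEC =====
def Spec_solution (want : List String) (number : List Int) (discount : List String) (out : Int) : Prop := out = solution_alt want number discount
instance (want : List String) (number : List Int) (discount : List String) (out : Int) : Decidable (Spec_solution want number discount out) := by unfold Spec_solution; infer_instance

-- ===== CLAIM (what is proved, stated in full; the proofs are below) =====
def Claim_equal_solution : Prop := ∀ (want : List String) (number : List Int) (discount : List String), Dom_solution want number discount → Spec_solution want number discount (solution want number discount)

-- ===== LEMMAS AND PROOFS =====

-- "window count of k matches the wanted count" (keys absent from dd count as unseen)
def okP (target dd : PySem.Dict String Int) (k : String) : Bool :=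
  decide (dd.get? k = target.get? k)

-- the number of satisfied wanted keys, as an Int (B's `satisfied` variable)
def satOf (target dd : PySem.Dict String Int) : Int :=
  (target.keys.countP (okP target dd) : Int)

theorem nodup_target_keys (want : List String) (number : List Int) :
    (((want.zip number).foldl (fun d (p : String × Int) => d.insert p.1 p.2)
      PySem.Dict.empty : PySem.Dict String Int)).keys.Nodup :=
  PySem.Dict.nodup_keys_foldl_insert_key _ Prod.fst _ _ PySem.Dict.nodup_keys_empty

theorem countP_update (p : String) (f g : String → Bool)
    (h : ∀ k, k ≠ p → f k = g k) :
    ∀ (l : List String), l.Nodup →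
    (l.countP g : Int) = (l.countP f : Int) +
      (if p ∈ l then (if g p then 1 else 0) - (if f p then 1 else 0) else 0) := by
  intro l
  induction l with
  | nil => simp
  | cons a l ih =>
    intro hnd
    rcases List.nodup_cons.mp hnd with ⟨ha, hl⟩
    have hrec := ih hl
    by_cases hap : a = p
    · rw [hap] at ha ⊢
      have hfg : l.countP f = l.countP g := List.countP_congr (fun k hk => by
        have hkp : k ≠ p := fun e => ha (e ▸ hk)
        rw [h k hkp])
      rw [if_pos (List.mem_cons_self), List.countP_cons, List.countP_cons, hfg]
      have hpl : p ∉ l := ha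
      rw [if_neg hpl] at hrec
      split_ifs <;> push_cast <;> omega
    · have hfa : f a = g a := h a hap
      have hmm : (p ∈ a :: l) ↔ p ∈ l :=
        List.mem_cons.trans (or_iff_right (fun e => hap e.symm))
      rw [List.countP_cons, List.countP_cons, hfa]
      by_cases hpl : p ∈ l
      · rw [if_pos (hmm.mpr hpl)]
        rw [if_pos hpl] at hrec
        split_ifs at hrec ⊢ <;> push_cast at hrec ⊢ <;> omega
      · rw [if_neg (fun m => hpl (hmm.mp m))]
        rw [if_neg hpl] at hrec
        split_ifs <;> push_cast at hrec ⊢ <;> omega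

theorem satOf_empty (target : PySem.Dict String Int) :
    satOf target PySem.Dict.empty = 0 := by
  unfold satOf
  have h : target.keys.countP (okP target PySem.Dict.empty) = 0 := by
    rw [List.countP_eq_zero]
    intro k hk
    have hne : target.get? k ≠ none := fun e =>
      ((PySem.Dict.get?_eq_none_iff_not_mem_keys target k).mp e) hk
    simp only [okP, PySem.Dict.get?_empty, decide_eq_true_eq]
    exact fun e => hne e.symm
  rw [h]
  rfl

theorem altAdd_spec (target dd : PySem.Dict String Int) (p : String) (δ : Int)
    (hnd : target.keys.Nodup) :
    altAdd target (dd, satOf target dd) p δ =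
      (dd.insert p (dd.getD p 0 + δ), satOf target (dd.insert p (dd.getD p 0 + δ))) := by
  have hup := countP_update p (okP target dd) (okP target (dd.insert p (dd.getD p 0 + δ)))
      (fun k hk => by simp [okP, PySem.Dict.get?_insert_of_ne dd _ hk]) target.keys hnd
  simp only [okP, decide_eq_true_eq] at hup
  simp only [altAdd, satOf]
  by_cases hc : target.contains p = true
  · have hpm : p ∈ target.keys := (PySem.Dict.contains_iff_mem_keys target p).mp hc
    rw [if_pos hpm] at hup
    rw [if_pos hc, if_pos hc]
    refine Prod.ext rfl ?_
    simp only
    split_ifs at hup ⊢ <;> omega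
  · have hpm : p ∉ target.keys := fun m => hc ((PySem.Dict.contains_iff_mem_keys target p).mpr m)
    rw [if_neg hpm] at hup
    rw [if_neg hc, if_neg hc]
    refine Prod.ext rfl ?_
    simp only
    omega

-- A's increment step is insertion of getD+1
theorem stepA_eq_insert (d : PySem.Dict String Int) (p : String) :
    (if d.contains p then d.modify p 0 (· + 1) else d.insert p 1) =
      d.insert p (d.getD p 0 + 1) := by
  by_cases h : d.contains p = true
  · rw [if_pos h]
    rfl
  · have h0 : d.getD p 0 = 0 :=
      PySem.Dict.getD_of_not_contains d 0 (eq_false_of_ne_true h)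
    rw [if_neg h, h0]
    norm_num

-- A's decrement step is insertion of getD-1 (= getD + (-1))
theorem stepA_decr (d : PySem.Dict String Int) (q : String) :
    d.modify q 0 (· - 1) = d.insert q (d.getD q 0 + (-1)) := by
  have h : d.getD q 0 - 1 = d.getD q 0 + (-1) := by omega
  show d.insert q (d.getD q 0 - 1) = _
  rw [h]

theorem compareDictLoop_all (wantD dd : PySem.Dict String Int) (l : List String) :
    compareDictLoop wantD dd l =
      l.all (fun k => dd.contains k && decide (wantD.getD k 0 = dd.getD k 0)) := by
  induction l with
  | nil => rfl
  | cons k rest ih =>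
    unfold compareDictLoop
    by_cases h1 : dd.contains k = true
    · by_cases h2 : wantD.getD k 0 = dd.getD k 0 <;> simp [h1, h2, ih]
    · simp [eq_false_of_ne_true h1]

theorem all_congr_mem {α : Type} (l : List α) (f g : α → Bool)
    (h : ∀ a ∈ l, f a = g a) : l.all f = l.all g := by
  induction l with
  | nil => rfl
  | cons a l ih =>
    rw [List.all_cons, List.all_cons, h a List.mem_cons_self,
      ih (fun b hb => h b (List.mem_cons_of_mem a hb))]

theorem okP_eq_check (target dd : PySem.Dict String Int) (k : String)
    (hk : k ∈ target.keys) :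
    (dd.contains k && decide (target.getD k 0 = dd.getD k 0)) = okP target dd k := by
  obtain ⟨v, hv⟩ : ∃ v, target.get? k = some v := by
    cases h : target.get? k with
    | none => exact absurd hk ((PySem.Dict.get?_eq_none_iff_not_mem_keys target k).mp h)
    | some v => exact ⟨v, rfl⟩
  have htv : target.getD k 0 = v := PySem.Dict.getD_of_get?_eq_some target 0 hv
  cases hd : dd.get? k with
  | none =>
    have hcf : dd.contains k = false := by
      rw [PySem.Dict.contains_eq_isSome_get?, hd]
      rfl
    simp [okP, hcf, hd, hv]
  | some w =>
    have hct : dd.contains k = true := by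
      rw [PySem.Dict.contains_eq_isSome_get?, hd]
      rfl
    have hdw : dd.getD k 0 = w := PySem.Dict.getD_of_get?_eq_some dd 0 hd
    simp [okP, hct, hd, hv, htv, hdw, eq_comm]

theorem compare_eq_sat (target dd : PySem.Dict String Int) :
    compareDict target dd = decide (satOf target dd = (target.keys.length : Int)) := by
  unfold compareDict satOf
  rw [compareDictLoop_all, all_congr_mem _ _ _ (fun k hk => okP_eq_check target dd k hk)]
  cases h : target.keys.all (okP target dd) with
  | false =>
    obtain ⟨k, hk, hfk⟩ := List.all_eq_false.mp h
    have hne : target.keys.countP (okP target dd) ≠ target.keys.length :=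
      fun e => hfk (List.countP_eq_length.mp e k hk)
    symm
    rw [decide_eq_false_iff_not]
    intro e
    exact hne (by exact_mod_cast e)
  | true =>
    have he : target.keys.countP (okP target dd) = target.keys.length :=
      List.countP_eq_length.mpr (fun a ha => List.all_eq_true.mp h a ha)
    symm
    rw [decide_eq_true_eq]
    exact_mod_cast he

-- B's initial fold tracks A's initial fold plus the correct satisfied counter
theorem init_fold (target : PySem.Dict String Int) (hnd : target.keys.Nodup) :
    ∀ (P : List String) (dd : PySem.Dict String Int),
    P.foldl (fun st p => altAdd target st p 1) (dd, satOf target dd) =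
      (P.foldl (fun d p => if d.contains p then d.modify p 0 (· + 1) else d.insert p 1) dd,
       satOf target (P.foldl (fun d p => if d.contains p then d.modify p 0 (· + 1) else d.insert p 1) dd)) := by
  intro P
  induction P with
  | nil => intro dd; rfl
  | cons p P ih =>
    intro dd
    simp only [List.foldl_cons]
    rw [altAdd_spec target dd p 1 hnd, stepA_eq_insert]
    exact ih _

-- B's main fold tracks A's main fold: same dict, correct counter, same count
theorem main_fold (target : PySem.Dict String Int) (hnd : target.keys.Nodup)
    (discount : List String) :
    ∀ (L : List Int) (dd : PySem.Dict String Int) (c : Int),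
    L.foldl (fun (st : (PySem.Dict String Int × Int) × Int) idx =>
        let st1 := altAdd target st.1 (PySem.List.pyGetD discount idx "") 1
        let c1 := if st1.2 = (target.size : Int) then st.2 + 1 else st.2
        (altAdd target st1 (PySem.List.pyGetD discount (idx - 9) "") (-1), c1))
      ((dd, satOf target dd), c) =
      (let r := L.foldl (fun (st : PySem.Dict String Int × Int) idx =>
          let p := PySem.List.pyGetD discount idx ""
          let d1 := if st.1.contains p then st.1.modify p 0 (· + 1) else st.1.insert p 1
          let c1 := if compareDict target d1 then st.2 + 1 else st.2
          let q := PySem.List.pyGetD discount (idx - 9) ""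
          (d1.modify q 0 (· - 1), c1)) (dd, c)
       ((r.1, satOf target r.1), r.2)) := by
  intro L
  induction L with
  | nil => intro dd c; rfl
  | cons idx L ih =>
    intro dd c
    simp only [List.foldl_cons]
    rw [altAdd_spec target dd _ 1 hnd]
    set p := PySem.List.pyGetD discount idx "" with hp
    set q := PySem.List.pyGetD discount (idx - 9) "" with hq
    have hd1 : (if dd.contains p then dd.modify p 0 (· + 1) else dd.insert p 1) =
        dd.insert p (dd.getD p 0 + 1) := stepA_eq_insert dd p
    have hcmp : (satOf target (dd.insert p (dd.getD p 0 + 1)) = (target.size : Int)) ↔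
        compareDict target (dd.insert p (dd.getD p 0 + 1)) = true := by
      rw [compare_eq_sat target _]
      have hsz : (target.size : Int) = (target.keys.length : Int) := by
        simp [PySem.Dict.size, PySem.Dict.keys]
      rw [hsz]
      simp
    rw [altAdd_spec target _ _ (-1) hnd]
    rw [← ih]
    simp only [hd1, ← stepA_decr]
    have hc2 : (if satOf target (dd.insert p (dd.getD p 0 + 1)) = (target.size : Int) then c + 1 else c)
        = (if compareDict target (dd.insert p (dd.getD p 0 + 1)) = true then c + 1 else c) := by
      by_cases h : satOf target (dd.insert p (dd.getD p 0 + 1)) = (target.size : Int)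
      · rw [if_pos h, if_pos (hcmp.mp h)]
      · rw [if_neg h, if_neg (fun e => h (hcmp.mpr e))]
    rw [hc2]

-- ===== VERDICT (by name: the statement is the Claim_ definition above) =====
theorem solution_spec : Claim_equal_solution := by
  intro want number discount _
  unfold Spec_solution solution solution_alt
  simp only
  set target := (want.zip number).foldl (fun d (p : String × Int) => d.insert p.1 p.2)
      PySem.Dict.empty with htarget
  have hnd : target.keys.Nodup := nodup_target_keys want number
  have h0 : ((PySem.Dict.empty : PySem.Dict String Int), (0 : Int)) =
      (PySem.Dict.empty, satOf target PySem.Dict.empty) := by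
    rw [satOf_empty target]
  rw [h0, init_fold target hnd]
  rw [main_fold target hnd discount]
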